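-- pv_equiv track=rewrite | github.com/epoyraz/leetcode | solutions/3805.py | maxActiveSectionsAfterTrade
-- ===== SOURCE A (Python) =====
-- def maxActiveSectionsAfterTrade(s):
--     """
--     :type s: str
--     :rtype: int
--     """
--     n = len(s)
--     # Count initial active sections
--     total_ones = s.count('1')
--
--     # Build segments of t = '1' + s + '1'
--     segments = []
--     curr_char = '1'
--     curr_len = 1
--     # Process s
--     for c in s:
--         if c == curr_char:
--             curr_len += 1
--         else:
--             segments.append((curr_char, curr_len))
--             curr_char = c
--             curr_len = 1
--     # Process trailing '1'
--     if curr_char == '1':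
--         curr_len += 1
--     else:
--         segments.append((curr_char, curr_len))
--         curr_char = '1'
--         curr_len = 1
--     segments.append((curr_char, curr_len))
--
--     # Compute max gain = z_left + z_right for each removable '1'-segment
--     max_gain = 0
--     m = len(segments)
--     # We can pick any '1'-segment at index i with zeros on both sides => i in [1..m-2]
--     for i in range(1, m-1):
--         typ, length = segments[i]
--         if typ == '1':
--             # neighbors must be zeros by construction of t
--             z_left = segments[i-1][1]
--             z_right = segments[i+1][1]
--             gain = z_left + z_right
--             if gain > max_gain:
--                 max_gain = gain
--
--     # Best we can do
--     return total_ones + max_gain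
-- ===== SOURCE B (Python) =====
-- def maxActiveSectionsAfterTrade(s):
--     """
--     :type s: str
--     :rtype: int
--     """
--     # Single streaming pass, O(1) extra space: no segment list is ever built.
--     # Keep only the current run (ch1, len1), the previous run (ch2, len2) and the
--     # length of the run before that (len3, -1 when absent).  When a run closes and
--     # the run before it is a '1'-run with a neighbour on its far side, that '1'-run
--     # is removable: its two neighbours merge, candidate gain len3 + len1.
--     ones = 0
--     gain = 0
--     ch1 = None; len1 = 0
--     ch2 = None; len2 = 0
--     len3 = -1
--     for c in s:
--         if c == '1':
--             ones += 1
--         if c == ch1: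
--             len1 += 1
--         else:
--             if ch2 == '1' and len3 >= 0:
--                 gain = max(gain, len3 + len1)
--             ch2, len2, len3 = ch1, len1, (len2 if ch2 is not None else -1)
--             ch1, len1 = c, 1
--     if ch2 == '1' and len3 >= 0:
--         gain = max(gain, len3 + len1)
--     return ones + gain
-- ===== Notes on version B (the rewrite author's own statement) =====
-- stated objective: alternative
-- what changed: B replaces A's materialised one-padded segment list plus index loop over it by a single streaming pass in O(1) extra space: it never builds a run list, keeping only the current run, the previous run and the length of the run before that, updates the gain each time a run closes, and accumulates the active-section count in the same pass instead of a separate count call.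
import Mathlib
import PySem

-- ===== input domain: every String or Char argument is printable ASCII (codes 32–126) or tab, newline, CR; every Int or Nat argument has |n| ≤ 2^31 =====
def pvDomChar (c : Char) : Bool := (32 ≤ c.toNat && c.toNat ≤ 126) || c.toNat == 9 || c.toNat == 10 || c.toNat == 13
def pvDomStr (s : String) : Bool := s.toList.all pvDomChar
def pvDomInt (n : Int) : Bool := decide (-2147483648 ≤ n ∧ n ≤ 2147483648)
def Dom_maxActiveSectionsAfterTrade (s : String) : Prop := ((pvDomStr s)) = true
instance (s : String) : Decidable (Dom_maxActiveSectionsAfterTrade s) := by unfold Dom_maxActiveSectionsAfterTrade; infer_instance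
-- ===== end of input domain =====

-- B replaces A's explicit one-padded segment list and index loop by a single streaming
-- pass in O(1) extra space: no run list is built, only the last three runs' data is kept
-- and the ones count is accumulated in the same pass (alternative decomposition, same cost).


-- ===== PORT A =====
-- A's run-length loop body (state: segments, curr_char, curr_len)
def aStep (st : List (Char × Int) × Char × Int) (c : Char) : List (Char × Int) × Char × Int :=
  if c = st.2.1 then (st.1, st.2.1, st.2.2 + 1)
  else (st.1 ++ [(st.2.1, st.2.2)], c, 1)

-- A's gain-loop body; segments[i] indexing is total via a default (i is always in range here)
def aGainStep (segments : List (Char × Int)) (mg : Int) (i : Int) : Int :=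
  let seg := PySem.List.pyGetD segments i ('?', 0)
  if seg.1 = '1' then
    let zl := (PySem.List.pyGetD segments (i - 1) ('?', 0)).2
    let zr := (PySem.List.pyGetD segments (i + 1) ('?', 0)).2
    if zl + zr > mg then zl + zr else mg
  else mg

def maxActiveSectionsAfterTrade (s : String) : Int :=
  let totalOnes : Int := (PySem.Str.count s "1" : Int)
  let st := s.toList.foldl aStep ([], '1', 1)
  let st2 := if st.2.1 = '1' then (st.1, st.2.1, st.2.2 + 1)
             else (st.1 ++ [(st.2.1, st.2.2)], '1', (1 : Int))
  let segments := st2.1 ++ [(st2.2.1, st2.2.2)]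
  let m : Int := segments.length
  let maxGain := (PySem.List.pyRange 1 (m - 1) 1).foldl (aGainStep segments) 0
  totalOnes + maxGain

-- ===== PORT B =====
-- B's O(1) streaming state: ones and gain so far, current run (ch1, len1),
-- previous run (ch2, len2), and the length of the run before that (len3; -1 = absent)
structure BSt where
  ones : Int
  gain : Int
  ch1 : Option Char
  len1 : Int
  ch2 : Option Char
  len2 : Int
  len3 : Int
deriving DecidableEq, Repr

def bInit : BSt := ⟨0, 0, none, 0, none, 0, -1⟩

-- one character of B's loop
def bStream (st : BSt) (c : Char) : BSt :=
  let ones := if c = '1' then st.ones + 1 else st.ones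
  if some c = st.ch1 then
    { st with ones := ones, len1 := st.len1 + 1 }
  else
    let gain := if st.ch2 = some '1' ∧ 0 ≤ st.len3 then max st.gain (st.len3 + st.len1)
                else st.gain
    ⟨ones, gain, some c, 1, st.ch1, st.len1, if st.ch2 ≠ none then st.len2 else -1⟩

def maxActiveSectionsAfterTrade_alt (s : String) : Int :=
  let st := s.toList.foldl bStream bInit
  let gain := if st.ch2 = some '1' ∧ 0 ≤ st.len3 then max st.gain (st.len3 + st.len1)
              else st.gain
  st.ones + gain

-- ===== PRECONDITION & SPEC =====
def Spec_maxActiveSectionsAfterTrade (s : String) (out : Int) : Prop := out = maxActiveSectionsAfterTrade_alt s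
instance (s : String) (out : Int) : Decidable (Spec_maxActiveSectionsAfterTrade s out) := by unfold Spec_maxActiveSectionsAfterTrade; infer_instance

-- ===== CLAIM (what is proved, stated in full; the proofs are below) =====
def Claim_equal_maxActiveSectionsAfterTrade : Prop := ∀ (s : String), Dom_maxActiveSectionsAfterTrade s → Spec_maxActiveSectionsAfterTrade s (maxActiveSectionsAfterTrade s)

-- ===== LEMMAS AND PROOFS =====

-- A's gain-loop body as a pure function of a three-segment window
def gA (acc : Int) (x y z : Char × Int) : Int :=
  if y.1 = '1' then (if x.2 + z.2 > acc then x.2 + z.2 else acc) else acc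

-- the same window function written with max (B's reading of it)
def gM (acc : Int) (x y z : Char × Int) : Int :=
  if y.1 = '1' then max acc (x.2 + z.2) else acc

-- sliding three-window fold (the common shape both sides are reduced to)
def triples (g : Int → Char × Int → Char × Int → Char × Int → Int) :
    List (Char × Int) → Int → Int
  | x :: y :: z :: rest, acc => triples g (y :: z :: rest) (g acc x y z)
  | _, acc => acc

-- reference run-length encoding of s (proof-only; neither port builds it)
def bStep (rs : List (Char × Int)) (c : Char) : List (Char × Int) :=
  match rs.getLast? with
  | some dn => if dn.1 = c then rs.dropLast ++ [(dn.1, dn.2 + 1)] else rs ++ [(c, 1)]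
  | none => [(c, 1)]

-- the front '1'-padding A's initial state ('1', 1) amounts to
def pad1 : List (Char × Int) → List (Char × Int)
  | [] => [('1', 1)]
  | (d, n) :: rest => if d = '1' then ('1', n + 1) :: rest else ('1', 1) :: (d, n) :: rest

-- adjacent runs carry distinct characters
def charsOK (rs : List (Char × Int)) : Prop := List.IsChain (· ≠ ·) (rs.map Prod.fst)

lemma pad1_cons (d : Char) (n : Int) (rest : List (Char × Int)) :
    pad1 ((d, n) :: rest) = if d = '1' then ('1', n + 1) :: rest else ('1', 1) :: (d, n) :: rest :=
  rfl

lemma concat_view {α : Type} (l : List α) (h : l ≠ []) : ∃ u x, l = u ++ [x] := by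
  obtain ⟨u, x, hx⟩ := (List.eq_nil_or_concat l).resolve_left h
  exact ⟨u, x, by simpa [List.concat_eq_append] using hx⟩

lemma pyGetD_int_nonneg (xs : List (Char × Int)) (i : Int) (h : 0 ≤ i) (d : Char × Int) :
    PySem.List.pyGetD xs i d = xs.getD i.toNat d := by
  have e : i = ((i.toNat : Nat) : Int) := by omega
  rw [e, PySem.List.pyGetD_natCast, Int.toNat_natCast]

lemma stepShift (x : Char × Int) (t : List (Char × Int)) (k : Nat) (mg : Int) :
    aGainStep (x :: t) mg (1 + ((k : Int) + 1)) = aGainStep t mg (1 + (k : Int)) := by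
  unfold aGainStep
  rw [pyGetD_int_nonneg (x :: t) _ (by omega), pyGetD_int_nonneg (x :: t) _ (by omega),
      pyGetD_int_nonneg (x :: t) _ (by omega), pyGetD_int_nonneg t _ (by omega),
      pyGetD_int_nonneg t _ (by omega), pyGetD_int_nonneg t _ (by omega)]
  rw [show (1 + ((k : Int) + 1)).toNat = (k + 1) + 1 by omega,
      show (1 + ((k : Int) + 1) - 1).toNat = k + 1 by omega,
      show (1 + ((k : Int) + 1) + 1).toNat = ((k + 1) + 1) + 1 by omega,
      show (1 + (k : Int)).toNat = k + 1 by omega,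
      show (1 + (k : Int) - 1).toNat = k by omega,
      show (1 + (k : Int) + 1).toNat = (k + 1) + 1 by omega]
  simp

lemma first_step (x y z : Char × Int) (rest : List (Char × Int)) (acc : Int) :
    aGainStep (x :: y :: z :: rest) acc 1 = gA acc x y z := by
  unfold aGainStep gA
  rw [pyGetD_int_nonneg _ 1 (by omega), pyGetD_int_nonneg _ (1 - 1) (by omega),
      pyGetD_int_nonneg _ (1 + 1) (by omega),
      show (1 : Int).toNat = 1 from rfl, show (1 - 1 : Int).toNat = 0 from rfl,
      show (1 + 1 : Int).toNat = 2 from rfl]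
  simp

lemma natFold : ∀ (l : List (Char × Int)) (acc : Int),
    (List.range (l.length - 2)).foldl (fun mg (k : Nat) => aGainStep l mg (1 + (k : Int))) acc
      = triples gA l acc := by
  intro l
  induction l with
  | nil => intro acc; simp [triples]
  | cons x t ih =>
    intro acc
    match t with
    | [] => simp [triples]
    | [y] => simp [triples]
    | y :: z :: rest =>
      have hlen : (x :: y :: z :: rest).length - 2 = rest.length + 1 := by simp
      rw [hlen, List.range_succ_eq_map, List.foldl_cons, List.foldl_map]
      have heq : (List.range rest.length).foldl
          (fun mg (k : Nat) => aGainStep (x :: y :: z :: rest) mg (1 + ((Nat.succ k : Nat) : Int)))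
          (aGainStep (x :: y :: z :: rest) acc (1 + ((0 : Nat) : Int)))
        = (List.range rest.length).foldl
          (fun mg (k : Nat) => aGainStep (y :: z :: rest) mg (1 + (k : Int)))
          (aGainStep (x :: y :: z :: rest) acc (1 + ((0 : Nat) : Int))) := by
        apply List.foldl_ext
        intro a b hb
        have e : ((Nat.succ b : Nat) : Int) = ((b : Int) + 1) := by push_cast; ring
        rw [e, stepShift]
      rw [heq]
      have hfs : aGainStep (x :: y :: z :: rest) acc (1 + ((0 : Nat) : Int)) = gA acc x y z := by
        rw [show (1 + ((0 : Nat) : Int)) = 1 by norm_num, first_step]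
      rw [hfs]
      have := ih (gA acc x y z)
      rw [show (y :: z :: rest).length - 2 = rest.length from by simp] at this
      rw [show triples gA (x :: y :: z :: rest) acc = triples gA (y :: z :: rest) (gA acc x y z)
          from rfl]
      exact this

lemma G (l : List (Char × Int)) (acc : Int) :
    (PySem.List.pyRange 1 ((l.length : Int) - 1) 1).foldl (aGainStep l) acc = triples gA l acc := by
  rw [PySem.List.pyRange_one,
      show ((l.length : Int) - 1 - 1).toNat = l.length - 2 from by omega,
      List.foldl_map]
  exact natFold l acc

-- bStep on a list written with its last element exposed
lemma bStep_concat (P : List (Char × Int)) (d : Char) (n : Int) (c : Char) :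
    bStep (P ++ [(d, n)]) c
      = if d = c then P ++ [(d, n + 1)] else (P ++ [(d, n)]) ++ [(c, 1)] := by
  simp [bStep]

-- bStep never touches the head of a list with at least two elements
lemma bStep_cons (h : Char × Int) (rest : List (Char × Int)) (c : Char) (hne : rest ≠ []) :
    bStep (h :: rest) c = h :: bStep rest c := by
  obtain ⟨P, ⟨d, n⟩, rfl⟩ := concat_view rest hne
  rw [show h :: (P ++ [(d, n)]) = (h :: P) ++ [(d, n)] from rfl]
  rw [bStep_concat, bStep_concat]
  split <;> simp

-- the one Python step of A, read on the virtual list segments ++ [pending], IS bStep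
lemma astep_virt (segs : List (Char × Int)) (cc : Char) (cl : Int) (c : Char) :
    (aStep (segs, cc, cl) c).1 ++ [((aStep (segs, cc, cl) c).2.1, (aStep (segs, cc, cl) c).2.2)]
      = bStep (segs ++ [(cc, cl)]) c := by
  rw [bStep_concat]
  by_cases hc : c = cc
  · subst hc; simp [aStep]
  · rw [if_neg (fun h => hc h.symm)]; simp [aStep, hc]

-- A's whole fold, read on the virtual list
lemma virt : ∀ (l : List Char) (segs : List (Char × Int)) (cc : Char) (cl : Int),
    (l.foldl aStep (segs, cc, cl)).1
        ++ [((l.foldl aStep (segs, cc, cl)).2.1, (l.foldl aStep (segs, cc, cl)).2.2)]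
      = l.foldl bStep (segs ++ [(cc, cl)]) := by
  intro l
  induction l with
  | nil => intro segs cc cl; rfl
  | cons c t ih =>
    intro segs cc cl
    simp only [List.foldl_cons]
    rcases ha : aStep (segs, cc, cl) c with ⟨s', c', l'⟩
    have hv : s' ++ [(c', l')] = bStep (segs ++ [(cc, cl)]) c := by
      rw [← astep_virt segs cc cl c, ha]
    rw [← hv]
    exact ih s' c' l'

-- A's trailing '1'-merge is one more bStep with '1'
lemma seg_eq (segs : List (Char × Int)) (cc : Char) (cl : Int) :
    (if cc = '1' then (segs, cc, cl + 1) else (segs ++ [(cc, cl)], '1', (1 : Int))).1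
        ++ [((if cc = '1' then (segs, cc, cl + 1) else (segs ++ [(cc, cl)], '1', (1 : Int))).2.1,
             (if cc = '1' then (segs, cc, cl + 1) else (segs ++ [(cc, cl)], '1', (1 : Int))).2.2)]
      = bStep (segs ++ [(cc, cl)]) '1' := by
  rw [bStep_concat]
  by_cases h : cc = '1'
  · subst h; simp
  · rw [if_neg h, if_neg h]

-- pad1 commutes with bStep
lemma pad1_bStep (rs : List (Char × Int)) (c : Char) :
    bStep (pad1 rs) c = pad1 (bStep rs c) := by
  match rs with
  | [] =>
    show bStep [('1', 1)] c = pad1 [(c, 1)]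
    rw [show ([('1', 1)] : List (Char × Int)) = [] ++ [('1', 1)] from rfl, bStep_concat]
    by_cases hc : c = '1'
    · subst hc; simp [pad1_cons]
    · rw [if_neg (fun h => hc h.symm)]; simp [pad1_cons, hc]
  | [(d, n)] =>
    by_cases hd : d = '1'
    · subst hd
      rw [show pad1 [('1', n)] = [('1', n + 1)] from by simp [pad1_cons],
          show ([('1', n + 1)] : List (Char × Int)) = [] ++ [('1', n + 1)] from rfl, bStep_concat,
          show ([('1', n)] : List (Char × Int)) = [] ++ [('1', n)] from rfl, bStep_concat]
      by_cases hc : '1' = c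
      · rw [if_pos hc, if_pos hc]; simp [pad1_cons]
      · rw [if_neg hc, if_neg hc]
        simp [pad1_cons]
    · rw [show pad1 [(d, n)] = [('1', 1), (d, n)] from by simp [pad1_cons, hd],
          bStep_cons ('1', 1) [(d, n)] c (by simp),
          show ([(d, n)] : List (Char × Int)) = [] ++ [(d, n)] from rfl, bStep_concat]
      by_cases hc : d = c
      · rw [if_pos hc]; simp [pad1_cons, hd]
      · rw [if_neg hc]; simp [pad1_cons, hd]
  | (h, k) :: r :: rs' =>
    have hne : (r :: rs' : List (Char × Int)) ≠ [] := by simp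
    by_cases hh : h = '1'
    · subst hh
      rw [show pad1 (('1', k) :: r :: rs') = ('1', k + 1) :: r :: rs' from by simp [pad1_cons],
          bStep_cons _ _ _ hne, bStep_cons _ _ _ hne]
      simp [pad1_cons]
    · rw [show pad1 ((h, k) :: r :: rs') = ('1', 1) :: (h, k) :: r :: rs' from by
            simp [pad1_cons, hh],
          bStep_cons ('1', 1) ((h, k) :: r :: rs') c (by simp),
          bStep_cons (h, k) (r :: rs') c hne]
      simp [pad1_cons, hh]

-- the whole fold commutes with pad1
lemma padFold : ∀ (l : List Char) (rs : List (Char × Int)),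
    l.foldl bStep (pad1 rs) = pad1 (l.foldl bStep rs) := by
  intro l
  induction l with
  | nil => intro rs; rfl
  | cons c t ih =>
    intro rs
    simp only [List.foldl_cons]
    rw [pad1_bStep, ih]

-- bStep preserves distinctness of adjacent run characters
lemma charsOK_bStep (rs : List (Char × Int)) (c : Char) (h : charsOK rs) :
    charsOK (bStep rs c) := by
  by_cases hrs : rs = []
  · subst hrs
    show charsOK [(c, 1)]
    unfold charsOK
    simp
  · obtain ⟨P, ⟨d, n⟩, rfl⟩ := concat_view rs hrs
    rw [bStep_concat]
    split
    · unfold charsOK at h ⊢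
      rw [show (P ++ [(d, n + 1)]).map Prod.fst = (P ++ [(d, n)]).map Prod.fst from by simp]
      exact h
    · rename_i hdc
      unfold charsOK at h ⊢
      rw [List.map_append]
      refine List.IsChain.append h ?_ ?_
      · simp
      · intro x hx y hy
        have hx' : x = d := by
          rw [show (P ++ [(d, n)]).map Prod.fst = P.map Prod.fst ++ [d] from by simp,
              List.getLast?_concat] at hx
          exact (by simpa using hx : d = x).symm
        have hy' : y = c := (by simpa using hy : c = y).symm
        subst hx'; subst hy'
        exact hdc

lemma charsOK_fold : ∀ (l : List Char), charsOK (l.foldl bStep []) := by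
  have key : ∀ (l : List Char) (rs : List (Char × Int)), charsOK rs → charsOK (l.foldl bStep rs) := by
    intro l
    induction l with
    | nil => intro rs h; exact h
    | cons c t ih => intro rs h; simp only [List.foldl_cons]; exact ih _ (charsOK_bStep rs c h)
  intro l
  exact key l [] (by unfold charsOK; simp)

-- window-level facts about triples gA
lemma T_drop (x y : Char × Int) (l : List (Char × Int)) (acc : Int) (hy : y.1 ≠ '1') :
    triples gA (x :: y :: l) acc = triples gA (y :: l) acc := by
  cases l with
  | nil => rfl
  | cons z rest =>
    show triples gA (y :: z :: rest) (gA acc x y z) = triples gA (y :: z :: rest) acc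
    rw [show gA acc x y z = acc from by simp [gA, hy]]

lemma T_head (x x' : Char × Int) (l : List (Char × Int)) (acc : Int)
    (hl : ∀ p ∈ l.head?, p.1 ≠ '1') :
    triples gA (x :: l) acc = triples gA (x' :: l) acc := by
  match l with
  | [] => rfl
  | [y] => rfl
  | y :: z :: rest =>
    have hy : y.1 ≠ '1' := hl y (by simp)
    show triples gA (y :: z :: rest) (gA acc x y z) = triples gA (y :: z :: rest) (gA acc x' y z)
    rw [show gA acc x y z = acc from by simp [gA, hy],
        show gA acc x' y z = acc from by simp [gA, hy]]

lemma T_app : ∀ (l : List (Char × Int)) (e : Char × Int) (acc : Int),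
    (∀ p ∈ l.getLast?, p.1 ≠ '1') →
    triples gA (l ++ [e]) acc = triples gA l acc := by
  intro l
  induction l with
  | nil => intro e acc _; rfl
  | cons x t ih =>
    intro e acc hlast
    match t with
    | [] => rfl
    | [y] =>
      have hy : y.1 ≠ '1' := hlast y (by simp)
      show triples gA [y, e] (gA acc x y e) = acc
      rw [show gA acc x y e = acc from by simp [gA, hy]]
      rfl
    | y :: z :: rest =>
      show triples gA (y :: z :: (rest ++ [e])) (gA acc x y z)
        = triples gA (y :: z :: rest) (gA acc x y z)
      have : (y :: z :: rest) ++ [e] = y :: z :: (rest ++ [e]) := rfl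
      rw [← this]
      exact ih e (gA acc x y z) (by
        intro p hp
        exact hlast p (by simpa using hp))

lemma T_last : ∀ (u : List (Char × Int)) (x x' : Char × Int) (acc : Int),
    (∀ p ∈ u.getLast?, p.1 ≠ '1') →
    triples gA (u ++ [x]) acc = triples gA (u ++ [x']) acc := by
  intro u
  induction u with
  | nil => intro x x' acc _; rfl
  | cons a t ih =>
    intro x x' acc hlast
    match t with
    | [] => rfl
    | [b] =>
      have hb : b.1 ≠ '1' := hlast b (by simp)
      show triples gA [b, x] (gA acc a b x) = triples gA [b, x'] (gA acc a b x')
      rw [show gA acc a b x = acc from by simp [gA, hb],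
          show gA acc a b x' = acc from by simp [gA, hb]]
      rfl
    | b :: d :: rest =>
      show triples gA (b :: d :: (rest ++ [x])) (gA acc a b d)
        = triples gA (b :: d :: (rest ++ [x'])) (gA acc a b d)
      have e1 : (b :: d :: rest) ++ [x] = b :: d :: (rest ++ [x]) := rfl
      have e2 : (b :: d :: rest) ++ [x'] = b :: d :: (rest ++ [x']) := rfl
      rw [← e1, ← e2]
      exact ih x x' (gA acc a b d) (by
        intro p hp
        exact hlast p (by simpa using hp))

-- a run strictly left of the last one does not carry the last one's character
lemma lastNe (P : List (Char × Int)) (d : Char) (n : Int)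
    (h : charsOK (P ++ [(d, n)])) : ∀ p ∈ P.getLast?, p.1 ≠ d := by
  intro p hp
  have hPne : P ≠ [] := by intro h0; subst h0; simp at hp
  obtain ⟨Q, q, rfl⟩ := concat_view P hPne
  rw [List.getLast?_concat] at hp
  have hq : q = p := by simpa using hp
  subst hq
  unfold charsOK at h
  rw [show ((Q ++ [q]) ++ [(d, n)]).map Prod.fst = (Q.map Prod.fst ++ [q.1]) ++ [d] from by simp,
      List.isChain_append] at h
  exact h.2.2 q.1 (by rw [List.getLast?_concat]; rfl) d (by simp)

-- the padded scan sees exactly the interior windows of the raw runs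
lemma C5 : ∀ (runs : List (Char × Int)) (acc : Int), charsOK runs →
    triples gA (bStep (pad1 runs) '1') acc = triples gA runs acc := by
  intro runs acc hok
  match runs with
  | [] =>
    show triples gA (bStep [('1', 1)] '1') acc = acc
    rw [show ([('1', 1)] : List (Char × Int)) = [] ++ [('1', 1)] from rfl, bStep_concat,
        if_pos rfl]
    rfl
  | [(d, n)] =>
    by_cases hd : d = '1'
    · subst hd
      rw [show pad1 [('1', n)] = [('1', n + 1)] from by simp [pad1_cons],
          show ([('1', n + 1)] : List (Char × Int)) = [] ++ [('1', n + 1)] from rfl, bStep_concat,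
          if_pos rfl]
      rfl
    · rw [show pad1 [(d, n)] = [('1', 1), (d, n)] from by simp [pad1_cons, hd],
          show ([('1', 1), (d, n)] : List (Char × Int)) = [('1', 1)] ++ [(d, n)] from rfl,
          bStep_concat, if_neg hd]
      show triples gA [(d, n), ('1', 1)] (gA acc ('1', 1) (d, n) ('1', 1)) = acc
      rw [show gA acc ('1', 1) (d, n) ('1', 1) = acc from by simp [gA, hd]]
      rfl
  | (h, k) :: r :: rs' =>
    obtain ⟨u, ⟨d, n⟩, hu⟩ := concat_view (r :: rs' : List (Char × Int)) (by simp)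
    have hrdecomp : ((h, k) :: r :: rs' : List (Char × Int)) = ((h, k) :: u) ++ [(d, n)] := by
      rw [hu]; rfl
    have hlastu : ∀ p ∈ ((h, k) :: u).getLast?, p.1 ≠ d := by
      intro p hp
      exact lastNe ((h, k) :: u) d n (by rw [← hrdecomp]; exact hok) p hp
    have hr1 : h ≠ r.1 := by
      unfold charsOK at hok
      simp only [List.map_cons] at hok
      exact (List.isChain_cons_cons.mp hok).1
    by_cases hh : h = '1'
    · subst hh
      have hpad : pad1 (('1', k) :: r :: rs') = ('1', k + 1) :: r :: rs' := by simp [pad1_cons]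
      rw [hpad]
      by_cases hd : d = '1'
      · subst hd
        have hune : u ≠ [] := by
          intro h0
          rw [h0] at hu
          simp at hu
          have : r.1 = '1' := by rw [hu.1]
          exact hr1 this.symm
        obtain ⟨w, u', rfl⟩ := List.exists_cons_of_ne_nil hune
        have hw : w = r ∧ rs' = u' ++ [('1', n)] := by
          constructor
          · have := hu; simp at this; exact this.1.symm
          · have := hu; simp at this; exact this.2
        rw [show (('1', k + 1) :: r :: rs' : List (Char × Int))
            = (('1', k + 1) :: w :: u') ++ [('1', n)] from by
              rw [hw.1, hw.2]; rfl, bStep_concat, if_pos rfl]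
        have hw1 : w.1 ≠ '1' := by rw [hw.1]; exact fun hh => hr1 hh.symm
        rw [show (('1', k + 1) :: w :: u') ++ [('1', n + 1)]
            = ('1', k + 1) :: (w :: u' ++ [('1', n + 1)]) from rfl]
        rw [T_head ('1', k + 1) ('1', k) (w :: u' ++ [('1', n + 1)]) acc
            (by intro p hp; simp at hp; rw [← hp]; exact hw1)]
        rw [show (('1', k) :: (w :: u' ++ [('1', n + 1)]))
            = (('1', k) :: w :: u') ++ [('1', n + 1)] from rfl]
        rw [T_last (('1', k) :: w :: u') ('1', n + 1) ('1', n) acc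
            (by intro p hp; exact hlastu p hp)]
        rw [show (('1', k) :: w :: u') ++ [('1', n)] = ('1', k) :: r :: rs' from by
          rw [hw.1, hw.2]; rfl]
      · rw [show (('1', k + 1) :: r :: rs' : List (Char × Int))
            = (('1', k + 1) :: u) ++ [(d, n)] from by rw [hu]; rfl, bStep_concat, if_neg hd]
        rw [show ((('1', k + 1) :: u) ++ [(d, n)]) ++ [('1', 1)]
            = ('1', k + 1) :: (u ++ [(d, n)] ++ [('1', 1)]) from by simp]
        have hhead : ∀ p ∈ (u ++ [(d, n)] ++ [('1', 1)]).head?, p.1 ≠ '1' := by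
          intro p hp
          rw [show u ++ [(d, n)] ++ [('1', 1)] = (u ++ [(d, n)]) ++ [('1', 1)] from by simp,
              ← hu] at hp
          simp at hp
          rw [← hp]
          exact fun hh => hr1 hh.symm
        rw [T_head ('1', k + 1) ('1', k) _ acc hhead]
        rw [show ('1', k) :: (u ++ [(d, n)] ++ [('1', 1)])
            = (('1', k) :: u ++ [(d, n)]) ++ [('1', 1)] from by simp]
        rw [T_app (('1', k) :: u ++ [(d, n)]) ('1', 1) acc (by
          intro p hp
          rw [show ('1', k) :: u ++ [(d, n)] = (('1', k) :: u) ++ [(d, n)] from rfl,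
              List.getLast?_concat] at hp
          obtain rfl : (d, n) = p := by simpa using hp
          exact hd)]
        rw [show ('1', k) :: u ++ [(d, n)] = ('1', k) :: r :: rs' from by rw [hu]; rfl]
    · have hpad : pad1 ((h, k) :: r :: rs') = ('1', 1) :: (h, k) :: r :: rs' := by
        simp [pad1_cons, hh]
      rw [hpad]
      by_cases hd : d = '1'
      · subst hd
        rw [show (('1', 1) :: (h, k) :: r :: rs' : List (Char × Int))
            = (('1', 1) :: (h, k) :: u) ++ [('1', n)] from by rw [hu]; rfl,
            bStep_concat, if_pos rfl]
        rw [show (('1', 1) :: (h, k) :: u) ++ [('1', n + 1)]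
            = ('1', 1) :: (h, k) :: (u ++ [('1', n + 1)]) from rfl]
        rw [T_drop ('1', 1) (h, k) (u ++ [('1', n + 1)]) acc hh]
        rw [show (h, k) :: (u ++ [('1', n + 1)]) = ((h, k) :: u) ++ [('1', n + 1)] from rfl]
        rw [T_last ((h, k) :: u) ('1', n + 1) ('1', n) acc hlastu]
        rw [show ((h, k) :: u) ++ [('1', n)] = (h, k) :: r :: rs' from by rw [hu]; rfl]
      · rw [show (('1', 1) :: (h, k) :: r :: rs' : List (Char × Int))
            = (('1', 1) :: (h, k) :: u) ++ [(d, n)] from by rw [hu]; rfl,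
            bStep_concat, if_neg hd]
        rw [show ((('1', 1) :: (h, k) :: u) ++ [(d, n)]) ++ [('1', 1)]
            = ('1', 1) :: (h, k) :: (u ++ [(d, n)] ++ [('1', 1)]) from by simp]
        rw [T_drop ('1', 1) (h, k) _ acc hh]
        rw [show (h, k) :: (u ++ [(d, n)] ++ [('1', 1)])
            = ((h, k) :: u ++ [(d, n)]) ++ [('1', 1)] from by simp]
        rw [T_app ((h, k) :: u ++ [(d, n)]) ('1', 1) acc (by
          intro p hp
          rw [show (h, k) :: u ++ [(d, n)] = ((h, k) :: u) ++ [(d, n)] from rfl,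
              List.getLast?_concat] at hp
          obtain rfl : (d, n) = p := by simpa using hp
          exact hd)]
        rw [show (h, k) :: u ++ [(d, n)] = (h, k) :: r :: rs' from by rw [hu]; rfl]

-- both window functions agree window by window
lemma TAeqTM : ∀ (l : List (Char × Int)) (acc : Int), triples gA l acc = triples gM l acc := by
  intro l
  induction l with
  | nil => intro acc; rfl
  | cons x t ih =>
    intro acc
    match t, ih with
    | [], _ => rfl
    | [y], _ => rfl
    | y :: z :: rest, ih =>
      show triples gA (y :: z :: rest) (gA acc x y z) = triples gM (y :: z :: rest) (gM acc x y z)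
      rw [show gA acc x y z = gM acc x y z from by unfold gA gM; split <;> [omega; rfl]]
      exact ih (gM acc x y z)

-- appending one run adds exactly one window at the end
lemma triples_concat (g : Int → Char × Int → Char × Int → Char × Int → Int) :
    ∀ (u : List (Char × Int)) (y z e : Char × Int) (acc : Int),
    triples g (u ++ [y, z, e]) acc = g (triples g (u ++ [y, z]) acc) y z e := by
  intro u
  induction u with
  | nil => intro y z e acc; rfl
  | cons a u ih =>
    intro y z e acc
    match u with
    | [] => exact ih y z e (g acc a y z)
    | [b] => exact ih y z e (g acc a b y)
    | b :: c' :: u'' =>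
      show triples g (b :: c' :: (u'' ++ [y, z, e])) (g acc a b c')
        = g (triples g (b :: c' :: (u'' ++ [y, z])) (g acc a b c')) y z e
      exact ih y z e (g acc a b c')

-- run lengths produced by bStep are positive
lemma bStep_pos (rs : List (Char × Int)) (c : Char) (h : ∀ p ∈ rs, 1 ≤ p.2) :
    ∀ p ∈ bStep rs c, 1 ≤ p.2 := by
  by_cases hrs : rs = []
  · subst hrs; intro p hp; simp [bStep] at hp; simp [hp]
  · obtain ⟨P, ⟨d, n⟩, rfl⟩ := concat_view rs hrs
    rw [bStep_concat]
    have hn : 1 ≤ n := h (d, n) (by simp)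
    have hP : ∀ p ∈ P, 1 ≤ p.2 := fun p hp => h p (by simp [hp])
    split
    · intro p hp
      rcases List.mem_append.mp hp with h1 | h1
      · exact hP p h1
      · simp at h1; simp [h1]; omega
    · intro p hp
      rcases List.mem_append.mp hp with h1 | h1
      · exact h p h1
      · simp at h1; simp [h1]

lemma runs_pos : ∀ (l : List Char), ∀ p ∈ l.foldl bStep [], 1 ≤ p.2 := by
  have key : ∀ (l : List Char) (rs : List (Char × Int)), (∀ p ∈ rs, 1 ≤ p.2) →
      ∀ p ∈ l.foldl bStep rs, 1 ≤ p.2 := by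
    intro l
    induction l with
    | nil => intro rs h; exact h
    | cons c t ih => intro rs h; simp only [List.foldl_cons]; exact ih _ (bStep_pos rs c h)
  intro l
  exact key l [] (by simp)

-- what B's stream state is, as a function of the ones count and the REVERSED run list
def mirror (ones : Int) (rr : List (Char × Int)) : BSt :=
  match rr with
  | [] => ⟨ones, 0, none, 0, none, 0, -1⟩
  | [r] => ⟨ones, 0, some r.1, r.2, none, 0, -1⟩
  | [r, q] => ⟨ones, 0, some r.1, r.2, some q.1, q.2, -1⟩
  | r :: q :: p :: v => ⟨ones, triples gM (q :: p :: v).reverse 0, some r.1, r.2,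
                         some q.1, q.2, p.2⟩

-- one stream step tracks one bStep on the reversed run list
lemma stream_step (ones : Int) (rr : List (Char × Int)) (c : Char)
    (hpos : ∀ p ∈ rr, 1 ≤ p.2) :
    bStream (mirror ones rr) c
      = mirror (if c = '1' then ones + 1 else ones) ((bStep rr.reverse c).reverse) := by
  match rr with
  | [] =>
    show bStream ⟨ones, 0, none, 0, none, 0, -1⟩ c = _
    simp [bStream, bStep, mirror]
  | [r] =>
    rw [show ([r] : List (Char × Int)).reverse = [] ++ [r] from by simp, bStep_concat]
    by_cases hc : r.1 = c
    · rw [if_pos hc]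
      simp [bStream, mirror, hc]
    · rw [if_neg hc]
      have : some c = some r.1 ↔ False := by simp; exact fun h => hc h.symm
      simp [bStream, mirror, this]
  | [r, q] =>
    rw [show ([r, q] : List (Char × Int)).reverse = [q] ++ [r] from by simp, bStep_concat]
    by_cases hc : r.1 = c
    · rw [if_pos hc]
      simp [bStream, mirror, hc]
    · rw [if_neg hc]
      have : some c = some r.1 ↔ False := by simp; exact fun h => hc h.symm
      simp [bStream, mirror, this, triples]
  | r :: q :: p :: v =>
    rw [show (r :: q :: p :: v : List (Char × Int)).reverse
        = (q :: p :: v).reverse ++ [r] from by simp, bStep_concat]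
    by_cases hc : r.1 = c
    · rw [if_pos hc]
      have e : ((q :: p :: v).reverse ++ [(r.1, r.2 + 1)]).reverse
          = (r.1, r.2 + 1) :: q :: p :: v := by simp
      rw [e]
      simp [bStream, mirror, hc]
    · rw [if_neg hc]
      have e : (((q :: p :: v).reverse ++ [r]) ++ [(c, 1)]).reverse
          = (c, 1) :: r :: q :: p :: v := by simp
      rw [e]
      have hp2 : (0 : Int) ≤ p.2 := by
        have := hpos p (by simp)
        omega
      have hcne : ¬ some c = some r.1 := by simp; exact fun h => hc h.symm
      have hgain : triples gM (r :: q :: p :: v).reverse 0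
          = gM (triples gM (q :: p :: v).reverse 0) p q r := by
        rw [show (r :: q :: p :: v : List (Char × Int)).reverse
            = v.reverse ++ [p, q, r] from by simp,
            show (q :: p :: v : List (Char × Int)).reverse
            = v.reverse ++ [p, q] from by simp]
        exact triples_concat gM v.reverse p q r 0
      show bStream ⟨ones, triples gM (q :: p :: v).reverse 0, some r.1, r.2,
            some q.1, q.2, p.2⟩ c
          = ⟨(if c = '1' then ones + 1 else ones), triples gM (r :: q :: p :: v).reverse 0,
             some c, 1, some r.1, r.2, q.2⟩
      rw [hgain]
      simp only [bStream, hcne, if_false, gM]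
      by_cases hq : q.1 = '1'
      · simp [hq, hp2, max_comm]
      · simp [hq]

-- the whole stream equals mirror of the whole run fold
lemma stream_inv : ∀ (l : List Char),
    l.foldl bStream bInit = mirror ((l.count '1' : Nat) : Int) ((l.foldl bStep []).reverse) := by
  intro l
  induction l using List.reverseRecOn with
  | nil => rfl
  | append_singleton l c ih =>
    rw [List.foldl_append, List.foldl_append, ih, List.foldl_cons, List.foldl_nil,
        List.foldl_cons, List.foldl_nil]
    have hpos : ∀ p ∈ (l.foldl bStep []).reverse, 1 ≤ p.2 := by
      intro p hp
      exact runs_pos l p (List.mem_reverse.mp hp)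
    rw [stream_step _ _ c hpos, List.reverse_reverse]
    congr 1
    by_cases hc : c = '1'
    · subst hc; simp [List.count_append]
    · simp [List.count_append, hc]

-- closing the stream at end of input adds exactly the last pending window
lemma mirror_final (ones : Int) (rr : List (Char × Int)) (hpos : ∀ p ∈ rr, 1 ≤ p.2) :
    (if (mirror ones rr).ch2 = some '1' ∧ 0 ≤ (mirror ones rr).len3 then
        max (mirror ones rr).gain ((mirror ones rr).len3 + (mirror ones rr).len1)
      else (mirror ones rr).gain)
      = triples gM rr.reverse 0 := by
  match rr with
  | [] => simp [mirror, triples]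
  | [r] => simp [mirror, triples]
  | [r, q] =>
    show (if some q.1 = some '1' ∧ (0 : Int) ≤ -1 then _ else (0 : Int)) = triples gM [q, r] 0
    rw [if_neg (by intro h; exact absurd h.2 (by norm_num))]
    rfl
  | r :: q :: p :: v =>
    have hp2 : (0 : Int) ≤ p.2 := by have := hpos p (by simp); omega
    have hgain : triples gM (r :: q :: p :: v).reverse 0
        = gM (triples gM (q :: p :: v).reverse 0) p q r := by
      rw [show (r :: q :: p :: v : List (Char × Int)).reverse
          = v.reverse ++ [p, q, r] from by simp,
          show (q :: p :: v : List (Char × Int)).reverse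
          = v.reverse ++ [p, q] from by simp]
      exact triples_concat gM v.reverse p q r 0
    rw [hgain]
    show (if some q.1 = some '1' ∧ (0 : Int) ≤ p.2 then
        max (triples gM (q :: p :: v).reverse 0) (p.2 + r.2)
      else triples gM (q :: p :: v).reverse 0) = gM (triples gM (q :: p :: v).reverse 0) p q r
    unfold gM
    by_cases hq : q.1 = '1'
    · simp [hq, hp2, max_comm]
    · simp [hq]

-- Python's s.count('1') is the character count of '1'
lemma count_go_one : ∀ (cs : List Char) (fuel acc : Nat), cs.length ≤ fuel →
    PySem.Chars.count.go ['1'] fuel cs acc = acc + cs.count '1' := by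
  intro cs
  induction cs with
  | nil =>
    intro fuel acc _
    cases fuel <;> simp [PySem.Chars.count.go]
  | cons h t ih =>
    intro fuel acc hlen
    match fuel with
    | 0 => simp at hlen
    | f + 1 =>
      rw [PySem.Chars.count.go]
      by_cases hh : h = '1'
      · subst hh
        rw [if_pos (by simp [List.isPrefixOf])]
        simp only [List.length_cons] at hlen
        rw [show List.drop (['1'] : List Char).length ('1' :: t) = t from by simp,
            ih f (acc + 1) (by omega)]
        simp
        omega
      · rw [if_neg (by simp [List.isPrefixOf]; exact fun he => hh he.symm)]
        simp only [List.length_cons] at hlen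
        rw [ih f acc (by omega)]
        simp [hh]

lemma str_count_one (s : String) :
    ((PySem.Str.count s "1" : Nat) : Int) = ((s.toList.count '1' : Nat) : Int) := by
  have : PySem.Str.count s "1" = s.toList.count '1' := by
    show PySem.Chars.count s.toList ['1'] = s.toList.count '1'
    rw [PySem.Chars.count]
    rw [if_neg (by simp)]
    rw [count_go_one s.toList s.toList.length 0 le_rfl]
    simp
  rw [this]

-- A reduced to the common form: count + interior-window scan of the raw runs
lemma A_eq (s : String) :
    maxActiveSectionsAfterTrade s
      = ((PySem.Str.count s "1" : Nat) : Int) + triples gM (s.toList.foldl bStep []) 0 := by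
  unfold maxActiveSectionsAfterTrade
  dsimp only
  congr 1
  rcases hA : s.toList.foldl aStep ([], '1', 1) with ⟨segs, cc, cl⟩
  dsimp only
  have hv : segs ++ [(cc, cl)] = s.toList.foldl bStep [('1', 1)] := by
    have := virt s.toList [] '1' 1
    rw [hA] at this
    simpa using this
  have hpad : s.toList.foldl bStep [('1', 1)] = pad1 (s.toList.foldl bStep []) := by
    rw [show ([('1', 1)] : List (Char × Int)) = pad1 [] from rfl, padFold]
  have hseg :
      (if cc = '1' then (segs, cc, cl + 1) else (segs ++ [(cc, cl)], '1', (1 : Int))).1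
          ++ [((if cc = '1' then (segs, cc, cl + 1) else (segs ++ [(cc, cl)], '1', (1 : Int))).2.1,
               (if cc = '1' then (segs, cc, cl + 1) else (segs ++ [(cc, cl)], '1', (1 : Int))).2.2)]
        = bStep (pad1 (s.toList.foldl bStep [])) '1' := by
    rw [← hpad, ← hv, seg_eq]
  rw [hseg, G, C5 _ _ (charsOK_fold s.toList), TAeqTM]

-- B reduced to the same form
lemma B_eq (s : String) :
    maxActiveSectionsAfterTrade_alt s
      = ((s.toList.count '1' : Nat) : Int) + triples gM (s.toList.foldl bStep []) 0 := by
  unfold maxActiveSectionsAfterTrade_alt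
  dsimp only
  rw [stream_inv s.toList]
  have hpos : ∀ p ∈ (s.toList.foldl bStep []).reverse, 1 ≤ p.2 := by
    intro p hp
    exact runs_pos s.toList p (List.mem_reverse.mp hp)
  rw [mirror_final _ _ hpos, List.reverse_reverse]
  have hones : (mirror ((s.toList.count '1' : Nat) : Int)
      ((s.toList.foldl bStep []).reverse)).ones = ((s.toList.count '1' : Nat) : Int) := by
    unfold mirror
    rcases (s.toList.foldl bStep []).reverse with _ | ⟨r, _ | ⟨q, _ | ⟨p, v⟩⟩⟩ <;> rfl
  rw [hones]

lemma main_eq (s : String) :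
    maxActiveSectionsAfterTrade s = maxActiveSectionsAfterTrade_alt s := by
  rw [A_eq, B_eq, str_count_one]

-- ===== VERDICT (by name: the statement is the Claim_ definition above) =====
theorem maxActiveSectionsAfterTrade_spec : Claim_equal_maxActiveSectionsAfterTrade := by
  intro s _
  exact main_eq s
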